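-- pv_equiv track=rewrite | github.com/Thomas-Risola/Choose-your-opponent | tirage_8e_8dec.py | all_matchup_with_S_given
-- ===== SOURCE A (Python) =====
-- def remove(winner, W):
--     W_restant = []
--     for equipe in W:
--         if (equipe != winner):
--             W_restant.append(equipe)
--     return W_restant
--
-- def permutation(S):
--     if (len(S) == 1):
--         return [S]
--     else:
--         perm = []
--         for i in range(len(S)):
--             for p in permutation(remove(S[i], S)):
--                 perm.append([S[i]] + p)
--         return perm
--
-- def all_matchup_with_S_given(W, S):
--     all_matchup = []
--     liste_permut_W = permutation(W)
--     for i in range(len(liste_permut_W)):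
--         matchup = []
--         for j in range(len(S)):
--             matchup.append([liste_permut_W[i][j], S[j]])
--         all_matchup.append(matchup)
--     return all_matchup
-- ===== SOURCE B (Python) =====
-- def all_matchup_with_S_given(W, S):
--     out = []
--     stack = [([], W)]
--     while stack:
--         prefix, rem = stack.pop()
--         if len(rem) == 1:
--             out.append([[t, s] for t, s in zip(prefix + rem, S)])
--         else:
--             for x in reversed(rem):
--                 stack.append((prefix + [x], [y for y in rem if y != x]))
--     return out
-- ===== Notes on version B (the rewrite author's own statement) =====
-- stated objective: alternative
-- what changed: B replaces A's two-phase design (a recursive permutation generator followed by an index-based pairing loop) with a single iterative worklist: an explicit stack of (prefix, remaining) states enumerates the same permutations in the same leftmost-first DFS order and each completed permutation is zipped with S at emission.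
import Mathlib
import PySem

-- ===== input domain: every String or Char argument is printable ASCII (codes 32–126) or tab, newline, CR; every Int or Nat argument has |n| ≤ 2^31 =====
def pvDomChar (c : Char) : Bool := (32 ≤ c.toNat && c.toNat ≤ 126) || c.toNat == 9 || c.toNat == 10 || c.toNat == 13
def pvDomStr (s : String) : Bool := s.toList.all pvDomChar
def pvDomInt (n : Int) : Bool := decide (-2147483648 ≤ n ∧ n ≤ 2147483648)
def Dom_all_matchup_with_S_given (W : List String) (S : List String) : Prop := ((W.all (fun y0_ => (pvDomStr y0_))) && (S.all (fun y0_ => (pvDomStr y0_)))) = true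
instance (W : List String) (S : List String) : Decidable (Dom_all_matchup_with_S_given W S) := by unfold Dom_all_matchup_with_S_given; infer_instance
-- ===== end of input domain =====

-- B replaces A's recursive permutation generator + index-pairing loop by one explicit-stack
-- worklist that emits each permutation zipped with S; same values, same order (objective: alternative).


-- ===== PORT A =====
-- Python 'remove': builds W_restant by appending every equipe != winner
def removeA (winner : String) (W : List String) : List String :=
  W.foldl (fun acc equipe => if equipe != winner then acc ++ [equipe] else acc) []

-- cited by permA's decreasing_by, hence stated before the port
theorem removeA_eq_filter (winner : String) (W : List String) :
    removeA winner W = W.filter (fun equipe => equipe != winner) :=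
  PySem.List.foldl_append_if_eq_filter _ W []

theorem removeA_length_lt (winner : String) (W : List String) (h : winner ∈ W) :
    (removeA winner W).length < W.length := by
  rw [removeA_eq_filter]
  apply List.length_filter_lt_length_iff_exists.mpr
  exact ⟨winner, h, by simp⟩

-- Python 'permutation': recursive, removes ALL copies of the chosen element
def permA (S : List String) : List (List String) :=
  if S.length = 1 then [S]
  else
    S.attach.foldl (fun perm x => perm ++ (permA (removeA x.1 S)).map (fun p => x.1 :: p)) []
termination_by S.length
decreasing_by exact removeA_length_lt _ _ x.2

def all_matchup_with_S_given (W : List String) (S : List String) : List (List (List String)) :=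
  let L := permA W
  (List.range L.length).foldl (fun all_matchup i =>
    all_matchup ++
      [(List.range S.length).foldl
        (fun matchup j => matchup ++ [[(L.getD i []).getD j "", S.getD j ""]]) []]) []

-- ===== PORT B =====
-- one emitted matchup: zip(prefix+rem, S) (Python zip truncates at the shorter list, as List.zip does)
def emitB (p : List String) (S : List String) : List (List String) :=
  (List.zip p S).map (fun ts => [ts.1, ts.2])

-- termination measure for the worklist: sum of (len(remaining)+1)! over the stack
def stackMeasure (st : List (List String × List String)) : Nat :=
  (st.map (fun e => (e.2.length + 1).factorial)).sum

-- cited by runB's decreasing_by, hence stated before the port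
theorem children_measure_lt (p rem : List String) (rest : List (List String × List String)) :
    stackMeasure ((rem.map (fun x => (p ++ [x], rem.filter (fun y => y != x)))) ++ rest)
      < stackMeasure ((p, rem) :: rest) := by
  unfold stackMeasure
  rw [List.map_append, List.sum_append]
  have hb : ∀ t ∈ (rem.map (fun x => (p ++ [x], rem.filter (fun y => y != x)))).map
      (fun e => (e.2.length + 1).factorial), t ≤ rem.length.factorial := by
    intro t ht
    simp only [List.map_map, List.mem_map, Function.comp] at ht
    obtain ⟨x, hx, rfl⟩ := ht
    have hlt : (rem.filter (fun y => y != x)).length < rem.length :=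
      List.length_filter_lt_length_iff_exists.mpr ⟨x, hx, by simp⟩
    exact Nat.factorial_le (by omega)
  have hsum := List.sum_le_card_nsmul _ _ hb
  simp only [List.length_map, smul_eq_mul] at hsum
  have hfac : rem.length * rem.length.factorial < (rem.length + 1).factorial := by
    rw [Nat.factorial_succ]
    exact Nat.mul_lt_mul_of_lt_of_le (Nat.lt_succ_self _) (le_refl _) (Nat.factorial_pos _)
  simp only [List.map_cons, List.sum_cons]
  omega

-- Python B's while loop: head of the list is the stack top (last pushed); Python pushes the
-- children of rem with 'for x in reversed(rem): stack.append(...)', i.e. the child of rem[0]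
-- ends on top — here: children listed in rem's order, prepended to the rest of the stack.
def runB (S : List String) (st : List (List String × List String)) : List (List (List String)) :=
  match st with
  | [] => []
  | (p, rem) :: rest =>
    if rem.length = 1 then
      emitB (p ++ rem) S :: runB S rest
    else
      runB S ((rem.map (fun x => (p ++ [x], rem.filter (fun y => y != x)))) ++ rest)
termination_by stackMeasure st
decreasing_by
  · unfold stackMeasure; simp only [List.map_cons, List.sum_cons]
    have := Nat.factorial_pos (rem.length + 1); omega
  · simpa using children_measure_lt p rem rest

def all_matchup_with_S_given_alt (W : List String) (S : List String) : List (List (List String)) :=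
  runB S [([], W)]

-- ===== PRECONDITION & SPEC =====
-- Pre_ excludes exactly the inputs on which the Python A raises IndexError: A emits a
-- permutation iff some element of W has multiplicity 1, every emitted permutation has
-- length #distinct(W) = W.dedup.length, and the pairing loop indexes it at 0..len(S)-1.
def Pre_all_matchup_with_S_given (W : List String) (S : List String) : Prop :=
  (∃ x ∈ W, W.count x = 1) → S.length ≤ W.dedup.length
instance (W : List String) (S : List String) : Decidable (Pre_all_matchup_with_S_given W S) := by
  unfold Pre_all_matchup_with_S_given; infer_instance

def pvWitness_all_matchup_with_S_given : List String × List String := (["a", "b"], ["x", "y"])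

def Spec_all_matchup_with_S_given (W : List String) (S : List String) (out : List (List (List String))) : Prop := out = all_matchup_with_S_given_alt W S
instance (W : List String) (S : List String) (out : List (List (List String))) : Decidable (Spec_all_matchup_with_S_given W S out) := by unfold Spec_all_matchup_with_S_given; infer_instance

-- ===== CLAIM (what is proved, stated in full; the proofs are below) =====
def Claim_equal_all_matchup_with_S_given : Prop := ∀ (W : List String) (S : List String), Dom_all_matchup_with_S_given W S → Pre_all_matchup_with_S_given W S → Spec_all_matchup_with_S_given W S (all_matchup_with_S_given W S)


-- ===== LEMMAS AND PROOFS =====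

-- unfolding permA in flatMap form when the length is not 1
theorem permA_flatMap (S : List String) (h : S.length ≠ 1) :
    permA S = S.flatMap (fun x => (permA (S.filter (fun y => y != x))).map (fun p => x :: p)) := by
  rw [permA, if_neg h,
    List.foldl_attach (f := fun perm x => perm ++ List.map (fun p => x :: p) (permA (removeA x S))),
    PySem.List.foldl_append_eq_flatMap]
  simp [removeA_eq_filter]

theorem permA_one (S : List String) (h : S.length = 1) : permA S = [S] := by
  rw [permA, if_pos h]

-- removing all copies of a present element drops the distinct count by exactly one
theorem dedup_filter_ne (W : List String) (x : String) (hx : x ∈ W) :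
    (W.filter (fun y => y != x)).dedup.length + 1 = W.dedup.length := by
  rw [← List.card_toFinset, ← List.card_toFinset, List.toFinset_filter]
  have he : W.toFinset.filter (fun a => a != x) = W.toFinset.erase x := by
    ext y
    simp [bne_iff_ne, Finset.mem_erase, and_comm]
  rw [he, Finset.card_erase_of_mem (List.mem_toFinset.mpr hx)]
  have : 0 < W.toFinset.card := Finset.card_pos.mpr ⟨x, List.mem_toFinset.mpr hx⟩
  omega

-- every emitted permutation has length = number of distinct elements of W
theorem permA_mem_length_aux (n : Nat) :
    ∀ (W : List String), W.length ≤ n → ∀ p ∈ permA W, p.length = W.dedup.length := by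
  induction n with
  | zero =>
    intro W hW p hp
    have : W = [] := List.length_eq_zero_iff.mp (by omega)
    subst this
    rw [permA_flatMap [] (by simp)] at hp
    simp at hp
  | succ n IH =>
    intro W hW p hp
    by_cases h1 : W.length = 1
    · obtain ⟨a, rfl⟩ := List.length_eq_one_iff.mp h1
      rw [permA_one _ h1] at hp
      simp at hp
      subst hp
      simp
    · rw [permA_flatMap W h1] at hp
      simp only [List.mem_flatMap, List.mem_map] at hp
      obtain ⟨x, hx, q, hq, rfl⟩ := hp
      have hlt : (W.filter (fun y => y != x)).length < W.length :=
        List.length_filter_lt_length_iff_exists.mpr ⟨x, hx, by simp⟩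
      have hq' := IH (W.filter (fun y => y != x)) (by omega) q hq
      have := dedup_filter_ne W x hx
      simp only [List.length_cons, hq']
      omega

theorem permA_mem_length (W : List String) : ∀ p ∈ permA W, p.length = W.dedup.length :=
  permA_mem_length_aux W.length W (le_refl _)

-- A emits a permutation only if some element of W has multiplicity 1
theorem permA_ne_nil_aux (n : Nat) :
    ∀ (W : List String), W.length ≤ n → permA W ≠ [] → ∃ x ∈ W, W.count x = 1 := by
  induction n with
  | zero =>
    intro W hW h
    have : W = [] := List.length_eq_zero_iff.mp (by omega)
    subst this
    exact absurd (by rw [permA_flatMap [] (by simp)]; simp) h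
  | succ n IH =>
    intro W hW h
    by_cases h1 : W.length = 1
    · obtain ⟨a, rfl⟩ := List.length_eq_one_iff.mp h1
      exact ⟨a, by simp, by simp⟩
    · rw [permA_flatMap W h1] at h
      have h2 : ∃ x ∈ W, permA (W.filter (fun y => y != x)) ≠ [] := by
        by_contra hc
        push Not at hc
        apply h
        apply List.flatMap_eq_nil_iff.mpr
        intro e he
        rw [hc e he]
        simp
      obtain ⟨x, hx, hne⟩ := h2
      have hlt : (W.filter (fun y => y != x)).length < W.length :=
        List.length_filter_lt_length_iff_exists.mpr ⟨x, hx, by simp⟩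
      obtain ⟨y, hy, hcy⟩ := IH (W.filter (fun y => y != x)) (by omega) hne
      have hmem := List.mem_filter.mp hy
      have hyx : (y != x) = true := hmem.2
      refine ⟨y, hmem.1, ?_⟩
      rw [← hcy, List.count_filter]
      simp only [hyx]
  
theorem permA_ne_nil (W : List String) (h : permA W ≠ []) : ∃ x ∈ W, W.count x = 1 :=
  permA_ne_nil_aux W.length W (le_refl _) h

-- the worklist computes, for each stack entry, prefix-extended permutations of the remainder
theorem runB_eq (S : List String) (st : List (List String × List String)) :
    runB S st = st.flatMap (fun e => (permA e.2).map (fun q => emitB (e.1 ++ q) S)) := by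
  generalize hm : stackMeasure st = n
  induction n using Nat.strong_induction_on generalizing st with
  | _ n IH =>
  match st with
  | [] => simp [runB]
  | (p, rem) :: rest =>
    rw [runB]
    by_cases h1 : rem.length = 1
    · rw [if_pos h1]
      have hrest : stackMeasure rest < n := by
        subst hm
        unfold stackMeasure
        simp only [List.map_cons, List.sum_cons]
        have := Nat.factorial_pos (rem.length + 1)
        omega
      rw [IH _ hrest rest rfl]
      simp [permA_one rem h1]
    · rw [if_neg h1]
      have hch : stackMeasure ((rem.map (fun x => (p ++ [x], rem.filter (fun y => y != x)))) ++ rest) < n :=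
        hm ▸ children_measure_lt p rem rest
      rw [IH _ hch _ rfl, List.flatMap_append, List.flatMap_cons, List.flatMap_map]
      congr 1
      rw [permA_flatMap rem h1, List.map_flatMap]
      simp only [List.map_map]
      simp [Function.comp_def]
  
-- A's pairing loop equals emitB when the permutation is long enough
theorem pairA_eq_emitB (perm S : List String) (h : S.length ≤ perm.length) :
    (List.range S.length).foldl
        (fun matchup j => matchup ++ [[perm.getD j "", S.getD j ""]]) [] = emitB perm S := by
  rw [PySem.List.foldl_append_singleton_eq_map, List.nil_append]
  apply List.ext_getElem
  · simp [emitB]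
    omega
  · intro i h1 h2
    simp only [List.length_map, List.length_range] at h1
    have hip : i < perm.length := Nat.lt_of_lt_of_le h1 h
    simp [emitB, hip, h1]

-- ===== VERDICT (by name: the statement is the Claim_ definition above) =====
theorem all_matchup_with_S_given_spec : Claim_equal_all_matchup_with_S_given := by
  intro W S hdom hpre
  unfold Spec_all_matchup_with_S_given all_matchup_with_S_given all_matchup_with_S_given_alt
  rw [runB_eq]
  simp only [List.flatMap_cons, List.flatMap_nil, List.append_nil, List.nil_append]
  rw [PySem.List.foldl_append_singleton_eq_map, List.nil_append]
  apply List.ext_getElem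
  · simp
  · intro i h1 h2
    simp only [List.length_map, List.length_range] at h1
    rw [List.getElem_map, List.getElem_map, List.getElem_range]
    rw [List.getD_eq_getElem _ _ (by simpa using h1)]
    have hmem : (permA W)[i] ∈ permA W := List.getElem_mem _
    have hlen : S.length ≤ (permA W)[i].length := by
      obtain ⟨x, hx, hc⟩ := permA_ne_nil W (List.ne_nil_of_mem hmem)
      rw [permA_mem_length W _ hmem]
      exact hpre ⟨x, hx, hc⟩
    exact pairA_eq_emitB _ S hlen
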